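-- pv_equiv track=rewrite | github.com/SROTRIYOSENGUPTA/GNN_MarketRegimeDetectionandEarlyWarning | GNNProject/thgnn/data/real_data.py | _get_tickers
-- ===== SOURCE A (Python) =====
-- from typing import Dict, List, Tuple
--
-- SP500_SAMPLE: Dict[str, List[str]] = {
--     "Energy": ["XOM", "CVX", "COP", "SLB", "EOG"],
--     "Materials": ["LIN", "APD", "SHW", "ECL", "NEM"],
--     "Industrials": ["HON", "UNP", "CAT", "GE", "RTX"],
--     "Consumer Discretionary": ["AMZN", "TSLA", "HD", "MCD", "NKE"],
--     "Consumer Staples": ["PG", "KO", "PEP", "COST", "WMT"],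
--     "Health Care": ["JNJ", "UNH", "PFE", "ABT", "TMO"],
--     "Financials": ["JPM", "BAC", "GS", "MS", "BLK"],
--     "Information Technology": ["AAPL", "MSFT", "NVDA", "GOOGL", "META"],
--     "Communication Services": ["DIS", "NFLX", "CMCSA", "VZ", "T"],
--     "Utilities": ["NEE", "DUK", "SO", "D", "AEP"],
--     "Real Estate": ["AMT", "PLD", "CCI", "EQIX", "SPG"],
-- }
--
-- SECTOR_CODES = {s: i for i, s in enumerate(SP500_SAMPLE.keys())}
--
-- def _get_tickers(n_stocks: int = 55) -> Tuple[List[str], Dict[str, int], Dict[str, int]]: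
--     """
--     Return (tickers, sector_map, subind_map).
--     sector_map: ticker → sector_code (0..10)
--     subind_map: ticker → sub-industry proxy (sector_code * 5 + position)
--     """
--     tickers, sector_map, subind_map = [], {}, {}
--     count = 0
--     for sector_name, syms in SP500_SAMPLE.items():
--         sec_code = SECTOR_CODES[sector_name]
--         for pos, sym in enumerate(syms):
--             if count >= n_stocks:
--                 break
--             tickers.append(sym)
--             sector_map[sym] = sec_code
--             subind_map[sym] = sec_code * 5 + pos  # proxy sub-industry
--             count += 1
--         if count >= n_stocks:
--             break
--     return tickers, sector_map, subind_map
-- ===== SOURCE B (Python) =====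
-- from typing import Dict, List, Tuple
--
-- SP500_SAMPLE: Dict[str, List[str]] = {
--     "Energy": ["XOM", "CVX", "COP", "SLB", "EOG"],
--     "Materials": ["LIN", "APD", "SHW", "ECL", "NEM"],
--     "Industrials": ["HON", "UNP", "CAT", "GE", "RTX"],
--     "Consumer Discretionary": ["AMZN", "TSLA", "HD", "MCD", "NKE"],
--     "Consumer Staples": ["PG", "KO", "PEP", "COST", "WMT"],
--     "Health Care": ["JNJ", "UNH", "PFE", "ABT", "TMO"],
--     "Financials": ["JPM", "BAC", "GS", "MS", "BLK"],
--     "Information Technology": ["AAPL", "MSFT", "NVDA", "GOOGL", "META"],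
--     "Communication Services": ["DIS", "NFLX", "CMCSA", "VZ", "T"],
--     "Utilities": ["NEE", "DUK", "SO", "D", "AEP"],
--     "Real Estate": ["AMT", "PLD", "CCI", "EQIX", "SPG"],
-- }
--
-- SECTOR_CODES = {s: i for i, s in enumerate(SP500_SAMPLE.keys())}
--
-- def _get_tickers(n_stocks: int = 55) -> Tuple[List[str], Dict[str, int], Dict[str, int]]:
--     """Block-arithmetic construction: every sector holds exactly 5 symbols, so
--     clamp n to [0, 55] and split it as k = 5*q + r; take q whole sector blocks
--     plus the first r symbols of block q.  The sector code IS the block index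
--     (SECTOR_CODES enumerates the dict keys in order), so no code lookup,
--     no running counter and no break are needed."""
--     k = min(max(n_stocks, 0), 55)
--     q, r = divmod(k, 5)
--     sectors = list(SP500_SAMPLE.values())
--     tickers: List[str] = []
--     sector_map: Dict[str, int] = {}
--     subind_map: Dict[str, int] = {}
--     for sec in range(q + (1 if r else 0)):
--         take = 5 if sec < q else r
--         for pos in range(take):
--             sym = sectors[sec][pos]
--             tickers.append(sym)
--             sector_map[sym] = sec
--             subind_map[sym] = sec * 5 + pos
--     return tickers, sector_map, subind_map
-- ===== Notes on version B (the rewrite author's own statement) =====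
-- stated objective: alternative
-- what changed: Replaces the counter-and-double-break nested loop over dict items with a block-arithmetic construction: clamp n to [0,55], split it by divmod(k,5) into q full sector blocks plus a remainder, and emit symbols by block index so SECTOR_CODES lookups, the running counter and both breaks disappear.
import Mathlib
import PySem

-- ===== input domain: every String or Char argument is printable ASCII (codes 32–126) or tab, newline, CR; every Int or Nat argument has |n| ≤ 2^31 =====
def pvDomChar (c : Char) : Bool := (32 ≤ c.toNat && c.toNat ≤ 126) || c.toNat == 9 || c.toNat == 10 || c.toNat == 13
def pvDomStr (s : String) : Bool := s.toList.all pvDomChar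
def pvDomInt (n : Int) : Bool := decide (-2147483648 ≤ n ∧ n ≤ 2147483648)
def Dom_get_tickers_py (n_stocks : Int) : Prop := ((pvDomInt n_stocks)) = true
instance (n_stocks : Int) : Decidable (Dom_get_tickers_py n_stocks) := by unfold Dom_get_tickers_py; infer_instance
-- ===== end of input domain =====

-- B replaces A's counter-and-double-break nested loop over dict items by block arithmetic:
-- clamp n to [0,55], split it by divmod(k,5) into q full 5-symbol sector blocks plus a remainder,
-- and emit symbols by block index (sector code = block index; no SECTOR_CODES lookup, no counter, no break).


-- ===== PORT A =====
-- SP500_SAMPLE: a dict literal with distinct string keys = its items in insertion order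
def spData : List (String × List String) :=
  [("Energy", ["XOM", "CVX", "COP", "SLB", "EOG"]),
   ("Materials", ["LIN", "APD", "SHW", "ECL", "NEM"]),
   ("Industrials", ["HON", "UNP", "CAT", "GE", "RTX"]),
   ("Consumer Discretionary", ["AMZN", "TSLA", "HD", "MCD", "NKE"]),
   ("Consumer Staples", ["PG", "KO", "PEP", "COST", "WMT"]),
   ("Health Care", ["JNJ", "UNH", "PFE", "ABT", "TMO"]),
   ("Financials", ["JPM", "BAC", "GS", "MS", "BLK"]),
   ("Information Technology", ["AAPL", "MSFT", "NVDA", "GOOGL", "META"]),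
   ("Communication Services", ["DIS", "NFLX", "CMCSA", "VZ", "T"]),
   ("Utilities", ["NEE", "DUK", "SO", "D", "AEP"]),
   ("Real Estate", ["AMT", "PLD", "CCI", "EQIX", "SPG"])]

-- SECTOR_CODES = {s: i for i, s in enumerate(SP500_SAMPLE.keys())}
def sectorCodes : PySem.Dict String Int :=
  (PySem.List.enumerate (spData.map (·.1)) 0).foldl
    (fun d p => d.insert p.2 p.1) PySem.Dict.empty

-- loop state: (tickers, sector_map, subind_map, count)
def StA : Type := List String × PySem.Dict String Int × PySem.Dict String Int × Int

-- inner 'for pos, sym in enumerate(syms)' loop; returning the state at 'break' is exact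
def innerA (n sec : Int) : List String → Int → StA → StA
  | [], _, st => st
  | sym :: rest, pos, (t, sm, im, c) =>
    if c ≥ n then (t, sm, im, c)
    else innerA n sec rest (pos + 1)
      (t ++ [sym], sm.insert sym sec, im.insert sym (sec * 5 + pos), c + 1)

-- outer 'for sector_name, syms in SP500_SAMPLE.items()' loop
def outerA (n : Int) : List (String × List String) → StA → StA
  | [], st => st
  | (sname, syms) :: rest, st =>
    -- SECTOR_CODES[sector_name]: the key is always present, so .getD 0 is exact (never the default)
    let sec := (sectorCodes.get? sname).getD 0
    let st' := innerA n sec syms 0 st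
    if st'.2.2.2 ≥ n then st' else outerA n rest st'

def get_tickers_py (n_stocks : Int) : List String × (List (String × Int)) × (List (String × Int)) :=
  match outerA n_stocks spData (([], PySem.Dict.empty, PySem.Dict.empty, 0) : StA) with
  | (t, sm, im, _) => (t, sm.items, im.items)

-- ===== PORT B =====
-- sectors = list(SP500_SAMPLE.values())
def sectorsB : List (List String) := spData.map (·.2)

-- loop state: (tickers, sector_map, subind_map)
def StB : Type := List String × PySem.Dict String Int × PySem.Dict String Int

-- inner 'for pos in range(take)' loop body; sectors[sec][pos] is always in range here,
-- so '.getD' defaults are exact (never taken)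
def innerB (sec take : Int) (st : StB) : StB :=
  (PySem.List.pyRange 0 take 1).foldl (fun (st : StB) pos =>
    let sym := (PySem.List.pyGet? ((PySem.List.pyGet? sectorsB sec).getD []) pos).getD ""
    (st.1 ++ [sym], st.2.1.insert sym sec, st.2.2.insert sym (sec * 5 + pos))) st

def get_tickers_py_alt (n_stocks : Int) : List String × (List (String × Int)) × (List (String × Int)) :=
  let k := min (max n_stocks 0) 55
  let q := PySem.Int.floordiv k 5
  let r := PySem.Int.mod k 5
  let st := (PySem.List.pyRange 0 (q + (if r ≠ 0 then 1 else 0)) 1).foldl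
    (fun st sec => innerB sec (if sec < q then 5 else r) st)
    (([], PySem.Dict.empty, PySem.Dict.empty) : StB)
  (st.1, st.2.1.items, st.2.2.items)

-- ===== PRECONDITION & SPEC =====
def Spec_get_tickers_py (n_stocks : Int) (out : List String × (List (String × Int)) × (List (String × Int))) : Prop := out = get_tickers_py_alt n_stocks
instance (n_stocks : Int) (out : List String × (List (String × Int)) × (List (String × Int))) : Decidable (Spec_get_tickers_py n_stocks out) := by unfold Spec_get_tickers_py; infer_instance

-- ===== CLAIM (what is proved, stated in full; the proofs are below) =====
def Claim_equal_get_tickers_py : Prop := ∀ (n_stocks : Int), Dom_get_tickers_py n_stocks → Spec_get_tickers_py n_stocks (get_tickers_py n_stocks)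

-- ===== LEMMAS AND PROOFS =====

-- inner loop of A: while the count budget covers the whole sym list, the bound n is irrelevant
lemma innerA_eq (n m sec : Int) : ∀ (syms : List String) (pos : Int)
    (t : List String) (sm im : PySem.Dict String Int) (c : Int),
    c + syms.length ≤ n → c + syms.length ≤ m →
    innerA n sec syms pos (t, sm, im, c) = innerA m sec syms pos (t, sm, im, c) := by
  intro syms
  induction syms with
  | nil => intro _ _ _ _ _ _ _; rfl
  | cons sym rest ih =>
    intro pos t sm im c hn hm
    simp only [List.length_cons] at hn hm
    simp only [innerA]
    rw [if_neg (by omega), if_neg (by omega)]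
    exact ih _ _ _ _ _ (by omega) (by omega)

-- and it increments the count by exactly the list length
lemma innerA_count (n sec : Int) : ∀ (syms : List String) (pos : Int)
    (t : List String) (sm im : PySem.Dict String Int) (c : Int),
    c + syms.length ≤ n →
    (innerA n sec syms pos (t, sm, im, c)).2.2.2 = c + syms.length := by
  intro syms
  induction syms with
  | nil => intro _ _ _ _ _ _; simp [innerA]
  | cons sym rest ih =>
    intro pos t sm im c hn
    simp only [List.length_cons] at hn ⊢
    simp only [innerA]
    rw [if_neg (by omega)]
    rw [ih _ _ _ _ _ (by omega)]
    omega

-- outer loop of A: with nonempty sector lists and a budget covering everything, the bound is irrelevant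
lemma outerA_eq (n m : Int) : ∀ (secs : List (String × List String))
    (t : List String) (sm im : PySem.Dict String Int) (c : Int),
    (∀ p ∈ secs, p.2 ≠ []) →
    c + ((((secs.map (fun p => p.2.length)) : List Nat).sum : Nat) : Int) ≤ n →
    c + ((((secs.map (fun p => p.2.length)) : List Nat).sum : Nat) : Int) ≤ m →
    outerA n secs (t, sm, im, c) = outerA m secs (t, sm, im, c) := by
  intro secs
  induction secs with
  | nil => intro _ _ _ _ _ _ _; rfl
  | cons hd rest ih =>
    intro t sm im c hne hn hm
    obtain ⟨sname, syms⟩ := hd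
    simp only [List.map_cons, List.sum_cons] at hn hm
    simp only [outerA]
    rw [innerA_eq n m _ syms 0 t sm im c (by omega) (by omega)]
    have hcount := innerA_count m ((sectorCodes.get? sname).getD 0) syms 0 t sm im c (by omega)
    rcases hst : innerA m ((sectorCodes.get? sname).getD 0) syms 0 (t, sm, im, c)
      with ⟨t', sm', im', c'⟩
    rw [hst] at hcount
    cases rest with
    | nil => split_ifs <;> rfl
    | cons r rs =>
      have hr : r.2 ≠ [] := hne r (by simp)
      have hrl : 1 ≤ r.2.length := List.length_pos_iff.mpr hr
      have hsum : 1 ≤ ((r :: rs).map (fun p => p.2.length)).sum := by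
        simp only [List.map_cons, List.sum_cons]; omega
      have hc' : c' = c + syms.length := hcount
      rw [if_neg (by simp only []; omega), if_neg (by simp only []; omega)]
      exact ih t' sm' im' c' (fun p hp => hne p (List.mem_cons_of_mem _ hp))
        (by omega) (by omega)

lemma a_neg (n : Int) (hn : n ≤ 0) : get_tickers_py n = ([], [], []) := by
  have h0 : (0 : Int) ≥ n := hn
  simp only [get_tickers_py, spData, outerA, innerA]
  rw [if_pos h0, if_pos h0]
  rfl

-- B depends on n only through its clamp to [0, 55]
lemma alt_clamp (n : Int) : get_tickers_py_alt n = get_tickers_py_alt (min (max n 0) 55) := by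
  simp only [get_tickers_py_alt]
  rw [show min (max (min (max n 0) 55) 0) 55 = min (max n 0) 55 from by omega]

-- ===== VERDICT (by name: the statement is the Claim_ definition above) =====
set_option maxRecDepth 10000 in
theorem get_tickers_py_spec : Claim_equal_get_tickers_py := by
  intro n _
  unfold Spec_get_tickers_py
  rcases lt_or_ge n 0 with h | h
  · rw [a_neg n (by omega), alt_clamp n,
      show min (max n 0) 55 = 0 from by omega]
    decide
  · rcases le_or_gt n 55 with h2 | h2
    · interval_cases n <;> decide
    · have ha : get_tickers_py n = get_tickers_py 55 := by
        unfold get_tickers_py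
        rw [outerA_eq n 55 spData [] PySem.Dict.empty PySem.Dict.empty 0 (by decide)
          (by rw [show (((spData.map (fun p => p.2.length)) : List Nat).sum) = 55 from rfl]; omega)
          (by rw [show (((spData.map (fun p => p.2.length)) : List Nat).sum) = 55 from rfl]; omega)]
      rw [ha, alt_clamp n, show min (max n 0) 55 = 55 from by omega]
      decide
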